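-- pv_equiv track=rewrite | github.com/chengyih001/UofT_ECE1718 | asgmnt2/hardware/gen_wallace_tree_multiplier.py | gen_partial_products
-- ===== SOURCE A (Python) =====
-- def gen_partial_products(op_size):
--     # initialize partial_products list
--     partial_products = []
--     for i in range(op_size):
--         partial_products.append([])
--         count = op_size-1
--         partial_products[i].append("")
--         for j in range(op_size*2-1):
--             if (j >= op_size-1-i and j <= op_size*2-2-i):
--                 partial_products[i].append("par_product[{}][{}]".format(i, count))
--                 count = count -1
--             else:
--                 partial_products[i].append("")
--     # shift the list
--     for i in range(op_size*2):
--         while (partial_products[-1][i] == "" and i != 0):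
--             for j in range(1, op_size):
--                 partial_products[-j][i] = partial_products[-j-1][i]
--             partial_products[0][i] = ""
--     return partial_products
-- ===== SOURCE B (Python) =====
-- def gen_partial_products(op_size):
--     # Directly compute the bottom-aligned compaction of each column in O(n^2),
--     # instead of simulating the repeated per-column shift loops.
--     n = op_size
--     if n <= 0:
--         return []
--     rows = [[""] for _ in range(n)]
--     for j in range(1, 2 * n):
--         hi = min(n - 1, 2 * n - 1 - j)   # last originally-occupied row of column j
--         lo = max(0, n - j)               # first originally-occupied row of column j
--         c = hi - lo + 1                  # entries in column j, pushed to the bottom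
--         for r in range(n):
--             if r >= n - c:
--                 i = hi - (n - 1 - r)
--                 rows[r].append("par_product[{}][{}]".format(i, 2 * n - 1 - i - j))
--             else:
--                 rows[r].append("")
--     return rows
-- ===== Notes on version B (the rewrite author's own statement) =====
-- stated objective: faster
-- what changed: B computes each column's bottom-aligned compaction in closed form (first/last occupied row per column) in one O(n^2) pass, replacing A's row build plus repeated whole-column shift loops (O(n^3)).
import Mathlib
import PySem

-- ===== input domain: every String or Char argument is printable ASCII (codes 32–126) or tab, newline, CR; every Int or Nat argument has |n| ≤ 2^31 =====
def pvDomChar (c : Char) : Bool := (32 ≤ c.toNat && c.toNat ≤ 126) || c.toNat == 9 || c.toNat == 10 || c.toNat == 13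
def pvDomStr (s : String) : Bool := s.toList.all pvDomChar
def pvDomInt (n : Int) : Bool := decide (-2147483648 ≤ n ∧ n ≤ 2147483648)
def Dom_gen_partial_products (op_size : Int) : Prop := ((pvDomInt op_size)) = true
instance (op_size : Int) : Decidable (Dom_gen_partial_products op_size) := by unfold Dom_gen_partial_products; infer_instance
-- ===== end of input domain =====

-- B computes each column's bottom-aligned compaction directly (O(n^2)) instead of A's
-- repeated per-column shift loops (O(n^3)); return values proved identical for every op_size.

-- shared string formatting: "par_product[{}][{}]".format(i, c)
def ppStr (i c : Int) : String :=
  "par_product[" ++ PySem.Int.toStr i ++ "][" ++ PySem.Int.toStr c ++ "]"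

-- ===== PORT A =====

-- inner row-building loop of A (the 'for j in range(op_size*2-1)' with the count counter)
def ppBuildRow (op_size i : Int) : List String :=
  ((PySem.List.pyRange 0 (op_size*2-1) 1).foldl
    (fun (st : List String × Int) j =>
      if op_size-1-i ≤ j ∧ j ≤ op_size*2-2-i then
        (st.1 ++ [ppStr i st.2], st.2 - 1)
      else
        (st.1 ++ [""], st.2))
    ([""], op_size-1)).1

-- one body of A's while loop: 'for j in range(1, op_size): M[-j][i] = M[-j-1][i]; M[0][i] = ""'
def ppShiftOnce (op_size : Int) (M : List (List String)) (i : Int) : List (List String) :=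
  let M' := (PySem.List.pyRange 1 op_size 1).foldl
    (fun M j =>
      PySem.List.pySetD M (-j)
        (PySem.List.pySetD (PySem.List.pyGetD M (-j) []) i
          (PySem.List.pyGetD (PySem.List.pyGetD M (-j-1) []) i "")))
    M
  PySem.List.pySetD M' 0 (PySem.List.pySetD (PySem.List.pyGetD M' 0 []) i "")

-- A's 'while (partial_products[-1][i] == "" and i != 0)'; fuel op_size.toNat is proved
-- sufficient below (the loop runs at most op_size-1 times in Python)
def ppWhile (op_size : Int) : Nat → List (List String) → Int → List (List String)
  | 0, M, _ => M
  | fuel+1, M, i =>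
    if PySem.List.pyGetD (PySem.List.pyGetD M (-1) []) i "" = "" ∧ i ≠ 0 then
      ppWhile op_size fuel (ppShiftOnce op_size M i) i
    else M

def gen_partial_products (op_size : Int) : List (List String) :=
  let M0 := (PySem.List.pyRange 0 op_size 1).foldl
    (fun acc i => acc ++ [ppBuildRow op_size i]) []
  (PySem.List.pyRange 0 (op_size*2) 1).foldl
    (fun M i => ppWhile op_size op_size.toNat M i) M0

-- ===== PORT B =====

def gen_partial_products_alt (op_size : Int) : List (List String) :=
  if op_size ≤ 0 then []
  else
    (PySem.List.pyRange 1 (op_size*2) 1).foldl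
      (fun rows j =>
        let hi := min (op_size-1) (op_size*2-1-j)
        let lo := max 0 (op_size-j)
        let c := hi - lo + 1
        rows.mapIdx (fun r row =>
          if op_size - c ≤ (r:Int) then
            let i := hi - (op_size-1-(r:Int))
            row ++ [ppStr i (op_size*2-1-i-j)]
          else row ++ [""]))
      ((List.range op_size.toNat).map (fun _ => [""]))

-- ===== PRECONDITION & SPEC =====
def Spec_gen_partial_products (op_size : Int) (out : List (List String)) : Prop := out = gen_partial_products_alt op_size
instance (op_size : Int) (out : List (List String)) : Decidable (Spec_gen_partial_products op_size out) := by unfold Spec_gen_partial_products; infer_instance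

-- ===== CLAIM (what is proved, stated in full; the proofs are below) =====
def Claim_equal_gen_partial_products : Prop := ∀ (op_size : Int), Dom_gen_partial_products op_size → Spec_gen_partial_products op_size (gen_partial_products op_size)

-- ===== LEMMAS AND PROOFS =====

-- canonical matrix form: N rows, W columns, entry F r j
def rmap (N W : Nat) (F : Nat → Nat → String) : List (List String) :=
  (List.range N).map (fun r => (List.range W).map (F r))

-- entry of A's matrix after phase 1 (row build), row r, column j
def Ent0 (n : Int) (r j : Nat) : String :=
  if 1 ≤ (j:Int) ∧ n - (j:Int) ≤ (r:Int) ∧ (r:Int) ≤ n*2-1-(j:Int) then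
    ppStr (r:Int) (n*2-1-(r:Int)-(j:Int))
  else ""

-- entry of the final (compacted) matrix, row r, column j — B's formula
def Ent (n : Int) (r j : Nat) : String :=
  if j = 0 then ""
  else if n - (min (n-1) (n*2-1-(j:Int)) - max 0 (n-(j:Int)) + 1) ≤ (r:Int) then
    ppStr (min (n-1) (n*2-1-(j:Int)) - (n-1-(r:Int)))
          (n*2-1-(min (n-1) (n*2-1-(j:Int)) - (n-1-(r:Int)))-(j:Int))
  else ""

-- one downward shift of column i
def shF (F : Nat → Nat → String) (i : Nat) : Nat → Nat → String :=
  fun r j => if j = i then (if r = 0 then "" else F (r-1) j) else F r j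

def shIter (i : Nat) : Nat → (Nat → Nat → String) → (Nat → Nat → String)
  | 0, F => F
  | s+1, F => shF (shIter i s F) i

theorem ppStr_ne_empty (i c : Int) : ppStr i c ≠ "" := by
  intro h
  have := congrArg String.toList h
  simp [ppStr, String.toList_append] at this

theorem rmap_congr {N W : Nat} {F G : Nat → Nat → String}
    (h : ∀ r, r < N → ∀ j, j < W → F r j = G r j) : rmap N W F = rmap N W G := by
  unfold rmap
  apply List.map_congr_left
  intro r hr
  apply List.map_congr_left
  intro j hj
  exact h r (List.mem_range.mp hr) j (List.mem_range.mp hj)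

theorem pySetD_negk' (xs : List (List String)) (k : Nat) (v : List String) (h1 : 0 < k) (h2 : k ≤ xs.length) :
    PySem.List.pySetD xs (-(k:Int)) v = xs.set (xs.length - k) v := by
  simp [PySem.List.pySetD, PySem.List.pySet?, PySem.List.pyIdx?]
  split_ifs with h3 h4 <;> simp_all

theorem set_map_range {α : Type} (N : Nat) (f : Nat → α) (k : Nat) (v : α) (hk : k < N) :
    ((List.range N).map f).set k v
      = (List.range N).map (fun r => if r = k then v else f r) := by
  apply List.ext_getElem <;> simp
  intro i hi
  split_ifs with h <;> simp [List.getElem_set, h]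
  · omega

theorem row_get {W : Nat} (g : Nat → String) (j : Nat) (hj : j < W) :
    PySem.List.pyGetD ((List.range W).map g) (j:Int) "" = g j := by
  simp [PySem.List.pyGetD_natCast, List.getD, hj]

theorem row_set {W : Nat} (g : Nat → String) (j : Nat) (v : String) (hj : j < W) :
    PySem.List.pySetD ((List.range W).map g) (j:Int) v
      = (List.range W).map (fun j' => if j' = j then v else g j') := by
  rw [PySem.List.pySetD_natCast]
  exact set_map_range W g j v hj

theorem rmap_get {N W : Nat} (F : Nat → Nat → String) (k : Nat) (hk : k < N) :
    PySem.List.pyGetD (rmap N W F) (k:Int) [] = (List.range W).map (F k) := by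
  simp [rmap, PySem.List.pyGetD_natCast, List.getD, hk]

theorem rmap_len {N W : Nat} (F : Nat → Nat → String) : (rmap N W F).length = N := by
  simp [rmap]

theorem rmap_get_negk {N W : Nat} (F : Nat → Nat → String) (k : Nat) (h1 : 0 < k) (h2 : k ≤ N) :
    PySem.List.pyGetD (rmap N W F) (-(k:Int)) [] = (List.range W).map (F (N-k)) := by
  rw [PySem.List.pyGetD_neg_natCast _ _ _ h1 (by rw [rmap_len]; exact h2)]
  simp [rmap]

theorem rmap_set_negk {N W : Nat} (F : Nat → Nat → String) (k : Nat) (v : List String)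
    (h1 : 0 < k) (h2 : k ≤ N) :
    PySem.List.pySetD (rmap N W F) (-(k:Int)) v
      = ((List.range N).map (fun r => (List.range W).map (F r))).set (N-k) v := by
  rw [pySetD_negk' _ _ _ h1 (by rw [rmap_len]; exact h2), rmap_len]
  rfl

-- combined: the single Python statement M[-k][i] = v on an rmap matrix
theorem set_entry_negk {N W : Nat} (F : Nat → Nat → String) (k j : Nat) (v : String)
    (h1 : 0 < k) (h2 : k ≤ N) (hj : j < W) :
    PySem.List.pySetD (rmap N W F) (-(k:Int))
        (PySem.List.pySetD (PySem.List.pyGetD (rmap N W F) (-(k:Int)) []) (j:Int) v)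
      = rmap N W (fun r j' => if r = N-k ∧ j' = j then v else F r j') := by
  rw [rmap_get_negk F k h1 h2, row_set _ _ _ hj, rmap_set_negk F k _ h1 h2,
      set_map_range N _ (N-k) _ (by omega)]
  unfold rmap
  apply List.map_congr_left
  intro r hr
  split_ifs with h
  · subst h
    apply List.map_congr_left
    intro j' hj'
    simp
  · apply List.map_congr_left
    intro j' hj'
    simp [h]

theorem shIter_comm (i : Nat) (s : Nat) (F : Nat → Nat → String) :
    shIter i s (shF F i) = shF (shIter i s F) i := by
  induction s with
  | zero => rfl
  | succ s ih => simp [shIter, ih]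

theorem shIter_col (i : Nat) (s : Nat) (F : Nat → Nat → String) (r j : Nat) :
    shIter i s F r j = if j = i then (if s ≤ r then F (r-s) j else "") else F r j := by
  induction s generalizing r with
  | zero => simp [shIter]
  | succ s ih =>
    simp only [shIter, shF]
    by_cases hj : j = i
    · subst hj
      rw [if_pos rfl, if_pos rfl]
      by_cases hr : r = 0
      · subst hr
        rw [if_pos rfl, if_neg (by omega)]
      · rw [if_neg hr, ih (r-1), if_pos rfl]
        by_cases hs : s + 1 ≤ r
        · rw [if_pos (by omega), if_pos hs]
          congr 1
          omega
        · rw [if_neg (by omega), if_neg hs]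
    · rw [if_neg hj, if_neg hj, ih r, if_neg hj]

-- ===== A phase 1: the row builder produces Ent0 =====

theorem buildRow_inv (n i : Int) (hn : 1 ≤ n) (hi : 0 ≤ i) (hi2 : i < n)
    (m : Nat) (hm : (m:Int) ≤ n*2-1) :
    (PySem.List.pyRange 0 (m:Int) 1).foldl
      (fun (st : List String × Int) j =>
        if n-1-i ≤ j ∧ j ≤ n*2-2-i then
          (st.1 ++ [ppStr i st.2], st.2 - 1)
        else
          (st.1 ++ [""], st.2))
      ([""], n-1)
    = ("" :: (List.range m).map
          (fun (j : Nat) => if n-1-i ≤ (j:Int) ∧ (j:Int) ≤ n*2-2-i then ppStr i (n*2-2-i-(j:Int)) else ""),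
       n-1 - max 0 (min (m:Int) (n*2-1-i) - (n-1-i))) := by
  induction m with
  | zero =>
    rw [PySem.List.pyRange_one_eq_nil (by omega)]
    simp
    omega
  | succ m ih =>
    have hm' : (m:Int) ≤ n*2-1 := by push_cast at hm ⊢; omega
    have hcast : ((m+1:Nat):Int) = (m:Int) + 1 := by push_cast; ring
    rw [hcast, PySem.List.pyRange_one_succ_right (by omega), List.foldl_append, ih hm']
    simp only [List.foldl_cons, List.foldl_nil]
    split_ifs with h
    · rw [Prod.ext_iff]
      refine ⟨?_, by simp; omega⟩
      have hv : n - 1 - max 0 (min (m:Int) (n*2-1-i) - (n-1-i)) = n*2-2-i-(m:Int) := by omega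
      simp only [List.range_succ, List.map_append, List.map_cons, List.map_nil, if_pos h, hv,
        List.cons_append]
    · rw [Prod.ext_iff]
      refine ⟨?_, by simp; omega⟩
      simp only [List.range_succ, List.map_append, List.map_cons, List.map_nil, if_neg h,
        List.cons_append]

theorem buildRow_eq (n : Int) (hn : 1 ≤ n) (r : Nat) (hr : (r:Int) < n) :
    ppBuildRow n (r:Int) = (List.range (2*n.toNat)).map (Ent0 n r) := by
  have h1 : ((n*2-1).toNat : Int) = n*2-1 := by omega
  unfold ppBuildRow
  rw [show (n*2-1) = (((n*2-1).toNat : Nat) : Int) from h1.symm,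
      buildRow_inv n r hn (by omega) hr (n*2-1).toNat (by omega)]
  simp only
  have h2 : 2*n.toNat = (n*2-1).toNat + 1 := by omega
  rw [h2, List.range_succ_eq_map, List.map_cons, List.map_map]
  have hhead : Ent0 n r 0 = "" := by simp [Ent0]
  rw [hhead]
  congr 1
  apply List.map_congr_left
  intro a _
  simp only [Function.comp_apply]
  unfold Ent0
  push_cast
  split_ifs with hA hB hB
  · congr 1
    omega
  · exact absurd ⟨by omega, by omega⟩ hB
  · exact absurd ⟨by omega, by omega⟩ hA
  · rfl

-- ===== A phase 2: one shift body on an rmap matrix =====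

theorem shiftOnce_inv (n : Int) (hn : 1 ≤ n) (F : Nat → Nat → String) (i : Nat)
    (hi : i < 2*n.toNat) (m : Nat) (hm : m ≤ n.toNat - 1) :
    (PySem.List.pyRange 1 (1+(m:Int)) 1).foldl
      (fun M j =>
        PySem.List.pySetD M (-j)
          (PySem.List.pySetD (PySem.List.pyGetD M (-j) []) (i:Int)
            (PySem.List.pyGetD (PySem.List.pyGetD M (-j-1) []) (i:Int) "")))
      (rmap n.toNat (2*n.toNat) F)
    = rmap n.toNat (2*n.toNat)
        (fun r j => if j = i ∧ n.toNat - m ≤ r then F (r-1) j else F r j) := by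
  induction m with
  | zero =>
    rw [show (1+(0:Nat):Int) = 1 by norm_num, PySem.List.pyRange_one_eq_nil (by omega)]
    simp only [List.foldl_nil]
    apply rmap_congr
    intro r hr j hj
    rw [if_neg]
    omega
  | succ m ih =>
    have hm' : m ≤ n.toNat - 1 := by omega
    have hcast : (1:Int)+((m+1:Nat):Int) = (1+(m:Int)) + 1 := by push_cast; ring
    rw [hcast, PySem.List.pyRange_one_succ_right (by omega), List.foldl_append, ih hm']
    simp only [List.foldl_cons, List.foldl_nil]
    have e1 : -(1+(m:Int)) = -(((m+1:Nat)):Int) := by push_cast; ring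
    have e2 : -(1+(m:Int))-1 = -(((m+2:Nat)):Int) := by push_cast; ring
    rw [e2, e1, rmap_get_negk _ (m+2) (by omega) (by omega),
        row_get _ i hi, set_entry_negk _ (m+1) i _ (by omega) (by omega) hi]
    apply rmap_congr
    intro r hr j hj
    by_cases hji : j = i
    · subst hji
      by_cases h1 : r = n.toNat - (m+1)
      · rw [if_pos ⟨h1, rfl⟩, if_neg (by rintro ⟨-, hc⟩; omega), if_pos ⟨rfl, by omega⟩]
        congr 1
        omega
      · rw [if_neg (by tauto)]
        by_cases h2 : n.toNat - m ≤ r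
        · rw [if_pos ⟨rfl, h2⟩, if_pos ⟨rfl, by omega⟩]
        · rw [if_neg (by rintro ⟨-, hc⟩; omega), if_neg (by rintro ⟨-, hc⟩; omega)]
    · rw [if_neg (by tauto), if_neg (by tauto), if_neg (by tauto)]

theorem set_entry_nat {N W : Nat} (F : Nat → Nat → String) (k j : Nat) (v : String)
    (hk : k < N) (hj : j < W) :
    PySem.List.pySetD (rmap N W F) ((k:Nat):Int)
        (PySem.List.pySetD (PySem.List.pyGetD (rmap N W F) ((k:Nat):Int) []) ((j:Nat):Int) v)
      = rmap N W (fun r j' => if r = k ∧ j' = j then v else F r j') := by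
  rw [rmap_get F k hk, row_set _ _ _ hj, PySem.List.pySetD_natCast]
  unfold rmap
  rw [set_map_range _ _ k _ hk]
  apply List.map_congr_left
  intro r hr
  split_ifs with h
  · subst h
    apply List.map_congr_left
    intro j' hj'
    simp
  · apply List.map_congr_left
    intro j' hj'
    simp [h]

theorem shiftOnce_eq (n : Int) (hn : 1 ≤ n) (F : Nat → Nat → String) (i : Nat)
    (hi : i < 2*n.toNat) :
    ppShiftOnce n (rmap n.toNat (2*n.toNat) F) (i:Int) = rmap n.toNat (2*n.toNat) (shF F i) := by
  unfold ppShiftOnce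
  have hn1 : n = 1 + ((n.toNat - 1 : Nat) : Int) := by omega
  rw [show (PySem.List.pyRange 1 n 1) = PySem.List.pyRange 1 (1+((n.toNat-1:Nat):Int)) 1 by rw [← hn1]]
  rw [shiftOnce_inv n hn F i hi (n.toNat-1) (le_refl _)]
  rw [show (0:Int) = ((0:Nat):Int) by norm_num,
      set_entry_nat _ 0 i _ (by omega) hi]
  apply rmap_congr
  intro r hr j hj
  unfold shF
  by_cases hr0 : r = 0
  · subst hr0
    by_cases hji : j = i
    · subst hji
      rw [if_pos ⟨rfl, rfl⟩, if_pos rfl, if_pos rfl]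
    · rw [if_neg (by tauto), if_neg (by tauto), if_neg hji]
  · by_cases hji : j = i
    · subst hji
      rw [if_neg (by tauto), if_pos ⟨rfl, by omega⟩, if_pos rfl, if_neg hr0]
    · rw [if_neg (by tauto), if_neg (by tauto), if_neg hji]

-- ===== A phase 2: the fueled while loop compacts one column =====

theorem shF_self (F : Nat → Nat → String) (i r : Nat) (hr : 1 ≤ r) :
    shF F i r i = F (r-1) i := by
  unfold shF
  rw [if_pos rfl, if_neg (by omega : ¬ r = 0)]

theorem while_eq (n : Int) (hn : 1 ≤ n) (i : Nat) (hi0 : 0 < i) (hi : i < 2*n.toNat)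
    (t : Nat) :
    ∀ (fuel : Nat) (F : Nat → Nat → String), t ≤ fuel → t ≤ n.toNat - 1 →
    (∀ s, s < t → F (n.toNat-1-s) i = "") → F (n.toNat-1-t) i ≠ "" →
    ppWhile n fuel (rmap n.toNat (2*n.toNat) F) (i:Int)
      = rmap n.toNat (2*n.toNat) (shIter i t F) := by
  induction t with
  | zero =>
    intro fuel F _ _ _ h4
    cases fuel with
    | zero => rfl
    | succ f =>
      simp only [ppWhile]
      rw [show (-1 : Int) = -((1:Nat):Int) by norm_num,
          rmap_get_negk _ 1 (by omega) (by omega), row_get _ i hi]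
      rw [if_neg (by rintro ⟨hc, -⟩; exact h4 hc)]
      rfl
  | succ t ih =>
    intro fuel F hfuel ht hs h4
    cases fuel with
    | zero => omega
    | succ f =>
      simp only [ppWhile]
      rw [show (-1 : Int) = -((1:Nat):Int) by norm_num,
          rmap_get_negk _ 1 (by omega) (by omega), row_get _ i hi]
      rw [if_pos ⟨by simpa using hs 0 (by omega), by exact_mod_cast (by omega : (i:Int) ≠ 0)⟩]
      rw [shiftOnce_eq n hn F i hi]
      rw [ih f (shF F i) (by omega) (by omega) ?_ ?_]
      · rw [shIter_comm]
        rfl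
      · intro s hst
        rw [shF_self F i _ (by omega)]
        have e : n.toNat - 1 - s - 1 = n.toNat - 1 - (s+1) := by omega
        rw [e]
        exact hs (s+1) (by omega)
      · rw [shF_self F i _ (by omega)]
        have e : n.toNat - 1 - t - 1 = n.toNat - 1 - (t+1) := by omega
        rw [e]
        exact h4

-- ===== column facts: Ent0's column j is a contiguous block; compacting it gives Ent =====

theorem col_t_le (n : Int) (hn : 1 ≤ n) (j : Nat) (hj1 : 1 ≤ j) (hj : j < 2*n.toNat) :
    (n-1 - min (n-1) (n*2-1-(j:Int))).toNat ≤ n.toNat - 1 := by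
  omega

theorem col_empty (n : Int) (hn : 1 ≤ n) (j : Nat) (hj1 : 1 ≤ j) (hj : j < 2*n.toNat)
    (s : Nat) (hs : s < (n-1 - min (n-1) (n*2-1-(j:Int))).toNat) :
    Ent0 n (n.toNat-1-s) j = "" := by
  unfold Ent0
  rw [if_neg (by rintro ⟨-, -, h3⟩; omega)]

theorem col_nonempty (n : Int) (hn : 1 ≤ n) (j : Nat) (hj1 : 1 ≤ j) (hj : j < 2*n.toNat) :
    Ent0 n (n.toNat-1-(n-1 - min (n-1) (n*2-1-(j:Int))).toNat) j ≠ "" := by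
  unfold Ent0
  rw [if_pos ⟨by omega, by omega, by omega⟩]
  apply ppStr_ne_empty

theorem col_glue (n : Int) (hn : 1 ≤ n) (j : Nat) (hj1 : 1 ≤ j) (hj : j < 2*n.toNat)
    (r : Nat) (hr : r < n.toNat) :
    (if (n-1 - min (n-1) (n*2-1-(j:Int))).toNat ≤ r then
        Ent0 n (r - (n-1 - min (n-1) (n*2-1-(j:Int))).toNat) j else "")
      = Ent n r j := by
  unfold Ent Ent0
  rw [if_neg (show ¬ j = 0 by omega)]
  by_cases hc : n - (min (n-1) (n*2-1-(j:Int)) - max 0 (n-(j:Int)) + 1) ≤ (r:Int)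
  · have htr : (n-1 - min (n-1) (n*2-1-(j:Int))).toNat ≤ r := by omega
    have e1 : ((r - (n-1 - min (n-1) (n*2-1-(j:Int))).toNat : Nat) : Int)
        = min (n-1) (n*2-1-(j:Int)) - (n-1-(r:Int)) := by omega
    have hcond : 1 ≤ (j:Int) ∧
        n - (j:Int) ≤ ((r - (n-1 - min (n-1) (n*2-1-(j:Int))).toNat : Nat) : Int) ∧
        ((r - (n-1 - min (n-1) (n*2-1-(j:Int))).toNat : Nat) : Int) ≤ n*2-1-(j:Int) :=
      ⟨by omega, by omega, by omega⟩
    rw [if_pos htr, if_pos hcond, if_pos hc, e1]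
  · rw [if_neg hc]
    by_cases htr : (n-1 - min (n-1) (n*2-1-(j:Int))).toNat ≤ r
    · have hnc : ¬ (1 ≤ (j:Int) ∧
          n - (j:Int) ≤ ((r - (n-1 - min (n-1) (n*2-1-(j:Int))).toNat : Nat) : Int) ∧
          ((r - (n-1 - min (n-1) (n*2-1-(j:Int))).toNat : Nat) : Int) ≤ n*2-1-(j:Int)) := by
        rintro ⟨-, h2, -⟩
        omega
      rw [if_pos htr, if_neg hnc]
    · rw [if_neg htr]

-- ===== A phase 2: the outer column loop =====

theorem phase2_inv (n : Int) (hn : 1 ≤ n) (m : Nat) (hm : m ≤ 2*n.toNat) :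
    (PySem.List.pyRange 0 (m:Int) 1).foldl
      (fun M i => ppWhile n n.toNat M i) (rmap n.toNat (2*n.toNat) (Ent0 n))
    = rmap n.toNat (2*n.toNat) (fun r j => if j < m then Ent n r j else Ent0 n r j) := by
  induction m with
  | zero =>
    rw [PySem.List.pyRange_one_eq_nil (by omega)]
    simp only [List.foldl_nil]
    apply rmap_congr
    intro r _ j _
    rw [if_neg (by omega)]
  | succ m ih =>
    have hm' : m ≤ 2*n.toNat := by omega
    have hcast : ((m+1:Nat):Int) = (m:Int) + 1 := by push_cast; ring
    rw [hcast, PySem.List.pyRange_one_succ_right (by omega), List.foldl_append, ih hm']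
    simp only [List.foldl_cons, List.foldl_nil]
    by_cases hm0 : m = 0
    · subst hm0
      have hN : ∃ f, n.toNat = f + 1 := ⟨n.toNat - 1, by omega⟩
      obtain ⟨f, hf⟩ := hN
      rw [hf]
      simp only [ppWhile, Nat.cast_zero]
      rw [if_neg (by rintro ⟨-, hc⟩; exact hc rfl)]
      apply rmap_congr
      intro r _ j _
      by_cases hj0 : j = 0
      · subst hj0
        rw [if_neg (by omega), if_pos (by omega)]
        simp [Ent, Ent0]
      · rw [if_neg (by omega), if_neg (by omega)]
    · have hj1 : 1 ≤ m := by omega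
      rw [while_eq n hn m hj1 (by omega) ((n-1 - min (n-1) (n*2-1-(m:Int))).toNat)
            n.toNat _ (by omega) (col_t_le n hn m hj1 (by omega)) ?_ ?_]
      · apply rmap_congr
        intro r hr j hj
        rw [shIter_col]
        by_cases hjm : j = m
        · rw [if_pos hjm, if_pos (show j < m+1 by omega)]
          simp only [hjm]
          rw [if_neg (show ¬ m < m by omega)]
          exact col_glue n hn m hj1 (by omega) r hr
        · rw [if_neg hjm]
          by_cases hlt : j < m
          · rw [if_pos hlt, if_pos (show j < m+1 by omega)]
          · rw [if_neg hlt, if_neg (show ¬ j < m+1 by omega)]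
      · intro s hs
        rw [if_neg (by omega)]
        exact col_empty n hn m hj1 (by omega) s hs
      · rw [if_neg (by omega)]
        exact col_nonempty n hn m hj1 (by omega)

-- ===== A: full characterization =====

theorem A_eq (n : Int) (hn : 1 ≤ n) :
    gen_partial_products n = rmap n.toNat (2*n.toNat) (Ent n) := by
  unfold gen_partial_products
  rw [PySem.List.foldl_append_singleton_eq_map, PySem.List.pyRange_one]
  simp only [sub_zero, List.map_map]
  have hM0 : (List.range n.toNat).map ((fun i => ppBuildRow n i) ∘ (fun k : Nat => (0:Int) + (k:Int)))
      = rmap n.toNat (2*n.toNat) (Ent0 n) := by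
    unfold rmap
    apply List.map_congr_left
    intro r hr
    simp only [Function.comp_apply, zero_add]
    exact buildRow_eq n hn r (by have := List.mem_range.mp hr; omega)
  rw [hM0]
  simp only [List.nil_append]
  rw [show n*2 = ((2*n.toNat : Nat) : Int) by omega]
  rw [phase2_inv n hn (2*n.toNat) (le_refl _)]
  apply rmap_congr
  intro r _ j hj
  rw [if_pos hj]

-- ===== B: characterization =====

theorem mapIdx_map_range {α β : Type} (N : Nat) (f : Nat → α) (g : Nat → α → β) :
    ((List.range N).map f).mapIdx g = (List.range N).map (fun r => g r (f r)) := by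
  apply List.ext_getElem <;> simp

theorem B_inv (n : Int) (hn : 1 ≤ n) (m : Nat) (hm : m ≤ 2*n.toNat - 1) :
    (PySem.List.pyRange 1 (1+(m:Int)) 1).foldl
      (fun rows j =>
        rows.mapIdx (fun r row =>
          if n - (min (n-1) (n*2-1-j) - max 0 (n-j) + 1) ≤ (r:Int) then
            row ++ [ppStr (min (n-1) (n*2-1-j) - (n-1-(r:Int)))
                      (n*2-1-(min (n-1) (n*2-1-j) - (n-1-(r:Int)))-j)]
          else row ++ [""]))
      ((List.range n.toNat).map (fun _ => [""]))
    = (List.range n.toNat).map (fun r => (List.range (m+1)).map (Ent n r)) := by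
  induction m with
  | zero =>
    rw [show (1+((0:Nat):Int)) = 1 by norm_num, PySem.List.pyRange_one_eq_nil (le_refl _)]
    simp only [List.foldl_nil]
    apply List.map_congr_left
    intro r _
    simp [Ent]
  | succ m ih =>
    have hm' : m ≤ 2*n.toNat - 1 := by omega
    have hcast : (1:Int)+((m+1:Nat):Int) = (1+(m:Int)) + 1 := by push_cast; ring
    rw [hcast, PySem.List.pyRange_one_succ_right (by omega), List.foldl_append, ih hm']
    simp only [List.foldl_cons, List.foldl_nil]
    rw [mapIdx_map_range]
    apply List.map_congr_left
    intro r hr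
    have e : ((m+1:Nat):Int) = 1+(m:Int) := by push_cast; ring
    conv_rhs => rw [List.range_succ, List.map_append, List.map_cons, List.map_nil]
    split_ifs with h
    · congr 1
      have hval : Ent n r (m+1)
          = ppStr (min (n-1) (n*2-1-(1+(m:Int))) - (n-1-(r:Int)))
              (n*2-1-(min (n-1) (n*2-1-(1+(m:Int))) - (n-1-(r:Int)))-(1+(m:Int))) := by
        unfold Ent
        rw [if_neg (by omega), e, if_pos h]
      rw [hval]
    · congr 1
      have hval : Ent n r (m+1) = "" := by
        unfold Ent
        rw [if_neg (by omega), e, if_neg h]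
      rw [hval]

theorem B_eq (n : Int) (hn : 1 ≤ n) :
    gen_partial_products_alt n = rmap n.toNat (2*n.toNat) (Ent n) := by
  unfold gen_partial_products_alt
  rw [if_neg (by omega)]
  have hbody : (fun (rows : List (List String)) (j : Int) =>
        let hi := min (n-1) (n*2-1-j)
        let lo := max 0 (n-j)
        let c := hi - lo + 1
        rows.mapIdx (fun r row =>
          if n - c ≤ (r:Int) then
            let i := hi - (n-1-(r:Int))
            row ++ [ppStr i (n*2-1-i-j)]
          else row ++ [""]))
      = (fun (rows : List (List String)) (j : Int) =>
        rows.mapIdx (fun r row =>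
          if n - (min (n-1) (n*2-1-j) - max 0 (n-j) + 1) ≤ (r:Int) then
            row ++ [ppStr (min (n-1) (n*2-1-j) - (n-1-(r:Int)))
                      (n*2-1-(min (n-1) (n*2-1-j) - (n-1-(r:Int)))-j)]
          else row ++ [""])) := rfl
  rw [hbody,
      show PySem.List.pyRange 1 (n*2) 1
          = PySem.List.pyRange 1 (1 + ((2*n.toNat - 1 : Nat) : Int)) 1 by
        rw [show n*2 = 1 + ((2*n.toNat-1:Nat):Int) by omega],
      B_inv n hn (2*n.toNat - 1) (le_refl _)]
  unfold rmap
  rw [show 2*n.toNat - 1 + 1 = 2*n.toNat by omega]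

-- ===== main equivalence =====

theorem main_eq (n : Int) : gen_partial_products n = gen_partial_products_alt n := by
  by_cases hn : n ≤ 0
  · unfold gen_partial_products gen_partial_products_alt
    rw [PySem.List.pyRange_one_eq_nil (by omega : n ≤ 0),
        PySem.List.pyRange_one_eq_nil (by omega : n*2 ≤ 0), if_pos hn]
    rfl
  · rw [A_eq n (by omega), B_eq n (by omega)]

-- ===== VERDICT (by name: the statement is the Claim_ definition above) =====
theorem gen_partial_products_spec : Claim_equal_gen_partial_products := by
  intro op_size _
  unfold Spec_gen_partial_products
  exact main_eq op_size
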